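-- pv_equiv track=rewrite | github.com/inon-peled/advent_of_code | y2016/d24/parts_1_and_2.py | _pairwise_distances
-- ===== SOURCE A (Python) =====
-- from collections import deque
--
-- def _bfs(start, neighbors_func, board):
--     q = deque([start])
--     dist = {start: 0}
--     prev = {}
--
--     while q:
--         u = q.popleft()
--         for v in neighbors_func(u, board):
--             if v not in dist:
--                 dist[v] = dist[u] + 1
--                 prev[v] = u
--                 q.append(v)
--
--     return dist
--
-- def _extract(start, numbers, dist):
--     extracted = dict()
--
--     for num in numbers:
--         i, j = numbers[num]
--         extracted[num] = dist[i, j]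
--
--     return extracted
--
-- def _valid_neighbors(state, board):
--     i, j = state
--     w = len(board[0])
--     h = len(board)
--
--     candidates = [
--         (i - 1, j),  # Up
--         (i + 1, j),  # Down
--         (i, j - 1),  # Left
--         (i, j + 1)  # Right
--     ]
--
--     n = []
--     for c in candidates:
--         if (0 <= c[0] < h) and (0 <= c[1] < w) and (board[c[0]][c[1]] != '#'):
--             n.append(c)
--     return n
--
-- def _pairwise_distances(numbers, board):
--     pairs = dict()
--     for num in numbers:
--         start = numbers[num]
--         dist = _bfs(start, _valid_neighbors, board)
--         extracted = _extract(start, numbers, dist)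
--         pairs[num] = extracted
--     return pairs
-- ===== SOURCE B (Python) =====
-- def _pairwise_distances(numbers, board):
--     pairs = dict()
--     for num in numbers:
--         start = numbers[num]
--         h = len(board)
--         w = len(board[0])
--         cells = [(i, j) for i in range(h) for j in range(w) if board[i][j] != '#']
--         dist = {start: 0}
--         for _ in range(h * w):
--             changed = False
--             for c in cells:
--                 for v in ((c[0] - 1, c[1]), (c[0] + 1, c[1]), (c[0], c[1] - 1), (c[0], c[1] + 1)):
--                     if v in dist and (c not in dist or dist[v] + 1 < dist[c]):
--                         dist[c] = dist[v] + 1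
--                         changed = True
--             if not changed:
--                 break
--         pairs[num] = {n: dist[numbers[n]] for n in numbers}
--     return pairs
-- ===== Notes on version B (the rewrite author's own statement) =====
-- stated objective: alternative
-- what changed: The per-node deque BFS (queue, visited dict, prev map) is replaced by Bellman-Ford-style relaxation: a precomputed list of open cells is swept repeatedly, relaxing each cell's distance from its already-labelled neighbours, until a sweep changes nothing; no queue or frontier is maintained at all.
-- outside the precondition, e.g. on _pairwise_distances({4: (-1, 2)}, ['?#', '']): A returns {4: {4: 0}}, B raises IndexError
import Mathlib
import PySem

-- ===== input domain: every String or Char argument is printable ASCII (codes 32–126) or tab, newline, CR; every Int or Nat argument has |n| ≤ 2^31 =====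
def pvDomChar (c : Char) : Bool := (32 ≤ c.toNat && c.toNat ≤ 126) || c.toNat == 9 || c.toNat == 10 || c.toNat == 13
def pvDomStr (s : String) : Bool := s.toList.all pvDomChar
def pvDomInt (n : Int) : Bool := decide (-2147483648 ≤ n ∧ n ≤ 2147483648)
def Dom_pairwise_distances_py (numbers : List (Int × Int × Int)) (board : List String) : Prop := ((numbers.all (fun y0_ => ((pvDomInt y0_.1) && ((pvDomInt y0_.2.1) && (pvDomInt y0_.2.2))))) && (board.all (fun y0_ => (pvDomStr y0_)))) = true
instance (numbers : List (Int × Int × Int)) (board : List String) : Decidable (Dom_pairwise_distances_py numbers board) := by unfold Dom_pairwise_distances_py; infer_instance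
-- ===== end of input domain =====

-- B replaces the per-node deque BFS (queue + visited dict + unused `prev` map) by Bellman–Ford
-- style relaxation: repeated full sweeps over the precomputed list of open cells, each cell
-- relaxed from its already-labelled neighbours, until a sweep changes nothing; equal return
-- value — neither function mutates its arguments.

-- ===== PORT A =====
-- _valid_neighbors(state, board)
def validNeighborsA (state : Int × Int) (board : List String) : List (Int × Int) :=
  let i := state.1
  let j := state.2
  -- w = len(board[0]): IndexError on board = [] is excluded by Pre_ (getD "" is never reached inside Pre_)
  let w : Int := PySem.Str.len ((PySem.List.pyGet? board 0).getD "")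
  let h : Int := (board.length : Int)
  let candidates : List (Int × Int) := [(i - 1, j), (i + 1, j), (i, j - 1), (i, j + 1)]
  candidates.foldl (fun n c =>
    if (0 ≤ c.1 ∧ c.1 < h) ∧ (0 ≤ c.2 ∧ c.2 < w) ∧
       ((PySem.Str.pyGet? ((PySem.List.pyGet? board c.1).getD "") c.2).getD '#') ≠ '#'
    then n ++ [c] else n) []

-- the while-loop of _bfs; fuel makes the loop total (h*w+2 pops always suffice, see lemmas)
def bfsLoopA (board : List String) :
    Nat → List (Int × Int) → PySem.Dict (Int × Int) Int → PySem.Dict (Int × Int) (Int × Int) →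
    PySem.Dict (Int × Int) Int
  | 0, _, dist, _ => dist
  | _ + 1, [], dist, _ => dist
  | fuel + 1, u :: q, dist, prev =>
      let s := (validNeighborsA u board).foldl
        (fun (s : List (Int × Int) × PySem.Dict (Int × Int) Int × PySem.Dict (Int × Int) (Int × Int)) v =>
          if s.2.1.contains v then s
          else (s.1 ++ [v], s.2.1.insert v (s.2.1.getD u 0 + 1), s.2.2.insert v u))
        (q, dist, prev)
      bfsLoopA board fuel s.1 s.2.1 s.2.2

-- _bfs(start, _valid_neighbors, board)
def bfsA (start : Int × Int) (board : List String) : PySem.Dict (Int × Int) Int :=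
  bfsLoopA board (board.length * ((PySem.List.pyGet? board 0).getD "").toList.length + 2)
    [start] (PySem.Dict.ofList [(start, 0)]) PySem.Dict.empty

-- _extract(start, numbers, dist); dist[i, j]: KeyError (unreachable cell) is excluded by Pre_, getD 0 unreached
def extractA (start : Int × Int) (numbers : PySem.Dict Int (Int × Int))
    (dist : PySem.Dict (Int × Int) Int) : PySem.Dict Int Int :=
  numbers.keys.foldl (fun e num =>
    let ij := numbers.getD num (0, 0)
    e.insert num ((dist.get? (ij.1, ij.2)).getD 0)) PySem.Dict.empty

def pairwise_distances_py (numbers : List (Int × Int × Int)) (board : List String) :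
    List (Int × List (Int × Int)) :=
  let nd := PySem.Dict.ofList numbers
  (nd.keys.foldl (fun pairs num =>
      let start := nd.getD num (0, 0)
      let dist := bfsA start board
      let extracted := extractA start nd dist
      pairs.insert num extracted.items)
    (PySem.Dict.empty : PySem.Dict Int (List (Int × Int)))).items

-- ===== PORT B =====
-- cells = [(i, j) for i in range(h) for j in range(w) if board[i][j] != '#']
-- board[i][j]: IndexError on rows shorter than row 0 is excluded by Pre_ (getD '#' is never reached inside Pre_)
def cellsAlt (board : List String) (h w : Int) : List (Int × Int) :=
  (PySem.List.pyRange 0 h 1).foldl (fun acc i =>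
    (PySem.List.pyRange 0 w 1).foldl (fun acc j =>
      if ((PySem.Str.pyGet? ((PySem.List.pyGet? board i).getD "") j).getD '#') ≠ '#'
      then acc ++ [(i, j)] else acc) acc) []

-- one sweep: 'changed = False; for c in cells: for v in (...): relax', returning (dist, changed)
def sweepAlt (cells : List (Int × Int))
    (s0 : PySem.Dict (Int × Int) Int × Bool) : PySem.Dict (Int × Int) Int × Bool :=
  cells.foldl (fun s c =>
    [(c.1 - 1, c.2), (c.1 + 1, c.2), (c.1, c.2 - 1), (c.1, c.2 + 1)].foldl
      (fun (s : PySem.Dict (Int × Int) Int × Bool) v =>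
        if s.1.contains v = true ∧ (¬ s.1.contains c = true ∨ s.1.getD v 0 + 1 < s.1.getD c 0)
        then (s.1.insert c (s.1.getD v 0 + 1), true) else s) s) s0

-- 'for _ in range(h * w): <sweep>; if not changed: break' as recursion on the iteration count
def roundsAlt (cells : List (Int × Int)) :
    Nat → PySem.Dict (Int × Int) Int → PySem.Dict (Int × Int) Int
  | 0, dist => dist
  | n + 1, dist =>
      let s := sweepAlt cells (dist, false)
      if s.2 then roundsAlt cells n s.1 else s.1

def pairwise_distances_py_alt (numbers : List (Int × Int × Int)) (board : List String) :
    List (Int × List (Int × Int)) :=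
  let nd := PySem.Dict.ofList numbers
  (nd.keys.foldl (fun pairs num =>
      let start := nd.getD num (0, 0)
      let h : Int := (board.length : Int)
      let w : Int := PySem.Str.len ((PySem.List.pyGet? board 0).getD "")
      let cells := cellsAlt board h w
      -- range(h * w): h, w ≥ 0 here, so the iteration count is (h * w).toNat exactly
      let dist := roundsAlt cells (h * w).toNat (PySem.Dict.ofList [(start, 0)])
      pairs.insert num
        (nd.keys.foldl (fun e n =>
            let ij := nd.getD n (0, 0)
            e.insert n ((dist.get? (ij.1, ij.2)).getD 0)) PySem.Dict.empty).items)
    (PySem.Dict.empty : PySem.Dict Int (List (Int × Int)))).items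

-- ===== PRECONDITION & SPEC =====
-- Pre_-side copy of the board geometry (independent of the ports): the 4-neighbourhood,
-- validity of a cell and the set of cells reachable from a start cell
-- (iterated neighbourhood closure; h*w iterations reach a fixpoint).
def candPre (u : Int × Int) : List (Int × Int) :=
  [(u.1 - 1, u.2), (u.1 + 1, u.2), (u.1, u.2 - 1), (u.1, u.2 + 1)]

def okPre (board : List String) (v : Int × Int) : Bool :=
  decide ((0 ≤ v.1 ∧ v.1 < (board.length : Int)) ∧
    (0 ≤ v.2 ∧ v.2 < PySem.Str.len ((PySem.List.pyGet? board 0).getD "")) ∧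
    ((PySem.Str.pyGet? ((PySem.List.pyGet? board v.1).getD "") v.2).getD '#') ≠ '#')

def expandPre (board : List String) (S : List (Int × Int)) : List (Int × Int) :=
  S.foldl (fun acc u =>
    ((candPre u).filter (okPre board)).foldl
      (fun acc v => if v ∈ acc then acc else acc ++ [v]) acc) S

def reachPre (board : List String) (c : Int × Int) : List (Int × Int) :=
  (expandPre board)^[board.length * ((board.headD "").toList.length)] [c]

-- Pre_ excludes exactly the inputs where A or B raises: numbers nonempty with an empty board
-- (IndexError at len(board[0])), a row shorter than the first row (IndexError: B indexes every
-- board[i][j] with j < len(board[0]); this also excludes some ragged boards whose short spots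
-- are walled off, on which A returns but B raises — see claim cites), and a numbered cell not
-- reachable from some other numbered cell (KeyError in both extractions).
def Pre_pairwise_distances_py (numbers : List (Int × Int × Int)) (board : List String) : Prop :=
  numbers = [] ∨
  (board ≠ [] ∧
   (∀ s ∈ board, (board.headD "").toList.length ≤ s.toList.length) ∧
   (∀ p ∈ (PySem.Dict.ofList numbers).items, ∀ q ∈ (PySem.Dict.ofList numbers).items,
      q.2 ∈ reachPre board p.2))
instance (numbers : List (Int × Int × Int)) (board : List String) :
    Decidable (Pre_pairwise_distances_py numbers board) := by
  unfold Pre_pairwise_distances_py; infer_instance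

def pvWitness_pairwise_distances_py : (List (Int × Int × Int)) × List String :=
  ([(0, 0, 0), (1, 0, 1)], ["?."])

def Spec_pairwise_distances_py (numbers : List (Int × Int × Int)) (board : List String)
    (out : List (Int × List (Int × Int))) : Prop := out = pairwise_distances_py_alt numbers board
instance (numbers : List (Int × Int × Int)) (board : List String)
    (out : List (Int × List (Int × Int))) : Decidable (Spec_pairwise_distances_py numbers board out) := by
  unfold Spec_pairwise_distances_py; infer_instance

-- ===== CLAIM (what is proved, stated in full; the proofs are below) =====
def Claim_equal_pairwise_distances_py : Prop := ∀ (numbers : List (Int × Int × Int)) (board : List String), Dom_pairwise_distances_py numbers board → Pre_pairwise_distances_py numbers board → Spec_pairwise_distances_py numbers board (pairwise_distances_py numbers board)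

-- ===== LEMMAS AND PROOFS =====

-- proof-side abbreviations
def candL (u : Int × Int) : List (Int × Int) :=
  [(u.1 - 1, u.2), (u.1 + 1, u.2), (u.1, u.2 - 1), (u.1, u.2 + 1)]

def wN (board : List String) : Nat := ((PySem.List.pyGet? board 0).getD "").toList.length
def HH (board : List String) : Int := (board.length : Int)
def WW (board : List String) : Int := PySem.Str.len ((PySem.List.pyGet? board 0).getD "")

-- the cell-validity test both ports perform, as a Bool
def okAb (board : List String) (v : Int × Int) : Bool :=
  decide ((0 ≤ v.1 ∧ v.1 < HH board) ∧ (0 ≤ v.2 ∧ v.2 < WW board) ∧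
    ((PySem.Str.pyGet? ((PySem.List.pyGet? board v.1).getD "") v.2).getD '#') ≠ '#')

lemma okPre_eq_okAb (board : List String) (v : Int × Int) : okPre board v = okAb board v := rfl

lemma candPre_eq_candL (u : Int × Int) : candPre u = candL u := rfl

-- common spec of one node's neighbour processing: new cells (in order) and the updated dict
def procP (board : List String) : List (Int × Int) → PySem.Dict (Int × Int) Int → Int →
    List (Int × Int) × PySem.Dict (Int × Int) Int
  | [], D, _ => ([], D)
  | v :: cs, D, dv =>
    if okAb board v && !D.contains v then
      let r := procP board cs (D.insert v dv) dv
      (v :: r.1, r.2)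
    else procP board cs D dv

-- one whole level: process a list of nodes in sequence
def mprocP (board : List String) : List (Int × Int) → PySem.Dict (Int × Int) Int → Int →
    List (Int × Int) × PySem.Dict (Int × Int) Int
  | [], D, _ => ([], D)
  | u :: F, D, dv =>
    let r := procP board (candL u) D dv
    let r2 := mprocP board F r.2 dv
    (r.1 ++ r2.1, r2.2)

-- level-synchronous form of A's BFS used as the stepping stone of the proof
def bfsLevelB (board : List String) (h w : Int) :
    Nat → List (Int × Int) → PySem.Dict (Int × Int) Int → Int → PySem.Dict (Int × Int) Int
  | 0, _, dist, _ => dist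
  | _ + 1, [], dist, _ => dist
  | fuel + 1, frontier, dist, depth =>
      let s := frontier.foldl
        (fun (s : List (Int × Int) × PySem.Dict (Int × Int) Int) c =>
          [(c.1 - 1, c.2), (c.1 + 1, c.2), (c.1, c.2 - 1), (c.1, c.2 + 1)].foldl
            (fun (s : List (Int × Int) × PySem.Dict (Int × Int) Int) v =>
              if ((0 ≤ v.1 ∧ v.1 < h) ∧ (0 ≤ v.2 ∧ v.2 < w) ∧
                  ((PySem.Str.pyGet? ((PySem.List.pyGet? board v.1).getD "") v.2).getD '#') ≠ '#') ∧
                 ¬ s.2.contains v = true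
              then (s.1 ++ [v], s.2.insert v (depth + 1)) else s) s)
        ([], dist)
      bfsLevelB board h w fuel s.1 s.2 (depth + 1)

def univC (board : List String) : List (Int × Int) :=
  ((List.range board.length) ×ˢ (List.range (wN board))).map (fun p => ((p.1 : Int), (p.2 : Int)))

def cnt (board : List String) (D : PySem.Dict (Int × Int) Int) : Nat :=
  ((univC board).filter (fun c => !D.contains c)).length

lemma univC_nodup (board : List String) : (univC board).Nodup := by
  refine List.Nodup.map ?_ (List.Nodup.product (List.nodup_range) (List.nodup_range))
  intro a b h
  simpa [Prod.ext_iff] using h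

lemma univC_length (board : List String) : (univC board).length = board.length * wN board := by
  simp [univC, List.length_product]

lemma ok_mem_univ {board : List String} {v : Int × Int} (h : okAb board v = true) :
    v ∈ univC board := by
  simp only [okAb, decide_eq_true_eq, HH, WW] at h
  obtain ⟨⟨h1, h2⟩, ⟨h3, h4⟩, _⟩ := h
  have hw : PySem.Str.len ((PySem.List.pyGet? board 0).getD "") = (wN board : Int) := by
    simp [wN, PySem.Str.len_eq]
  rw [hw] at h4
  simp only [univC, List.mem_map]
  refine ⟨(v.1.toNat, v.2.toNat), ?_, ?_⟩
  · simp only [List.mem_product, List.mem_range]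
    omega
  · have e1 : ((v.1.toNat, v.2.toNat).1 : Int) = v.1 := by simp; omega
    have e2 : ((v.1.toNat, v.2.toNat).2 : Int) = v.2 := by simp; omega
    exact Prod.ext e1 e2

lemma cnt_le (board : List String) (D : PySem.Dict (Int × Int) Int) :
    cnt board D ≤ board.length * wN board := by
  calc cnt board D ≤ (univC board).length := List.length_filter_le _ _
  _ = _ := univC_length board

lemma filter_count_drop {l : List (Int × Int)} (hn : l.Nodup) (p : (Int × Int) → Bool)
    {v : Int × Int} (hv : v ∈ l) (hp : p v = true) :
    (l.filter (fun c => !(c == v) && p c)).length + 1 = (l.filter p).length := by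
  induction l with
  | nil => cases hv
  | cons a t ih =>
    rcases List.mem_cons.mp hv with rfl | hvt
    · have hvt : v ∉ t := (List.nodup_cons.mp hn).1
      have ht : t.filter (fun c => !(c == v) && p c) = t.filter p := by
        apply List.filter_congr
        intro c hc
        have : c ≠ v := fun h => hvt (h ▸ hc)
        simp [this]
      simp [hp, ht]
    · have hne : a ≠ v := by rintro rfl; exact (List.nodup_cons.mp hn).1 hvt
      have ih' := ih (List.nodup_cons.mp hn).2 hvt
      by_cases hpa : p a = true
      · simp [hpa, hne, List.filter_cons]; omega
      · simp only [Bool.not_eq_true] at hpa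
        simp [List.filter_cons, hpa, hne, ih']

lemma cnt_insert {board : List String} {D : PySem.Dict (Int × Int) Int} {v : Int × Int}
    (hm : v ∈ univC board) (hc : D.contains v = false) (x : Int) :
    cnt board (D.insert v x) + 1 = cnt board D := by
  have : ∀ c, (!(D.insert v x).contains c) = (!(c == v) && !D.contains c) := by
    intro c
    rw [PySem.Dict.contains_insert]
    cases h : (c == v) <;> simp [h]
  unfold cnt
  rw [List.filter_congr (fun c _ => this c)]
  exact filter_count_drop (univC_nodup board) (fun c => !D.contains c) hm (by simp [hc])

-- ---- facts about procP ----
lemma proc_contains (board : List String) :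
    ∀ (cs : List (Int × Int)) (D : PySem.Dict (Int × Int) Int) (dv : Int) (x : Int × Int),
      ((procP board cs D dv).2.contains x) = (D.contains x || decide (x ∈ (procP board cs D dv).1)) := by
  intro cs
  induction cs with
  | nil => intro D dv x; simp [procP]
  | cons v cs ih =>
    intro D dv x
    by_cases hg : (okAb board v && !D.contains v) = true
    · simp only [procP, if_pos hg]
      rw [ih]
      rw [PySem.Dict.contains_insert]
      by_cases hxv : x = v
      · subst hxv; simp
      · simp [hxv, beq_eq_false_iff_ne.mpr hxv]
    · simp only [procP, if_neg hg]
      exact ih D dv x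

lemma proc_fst_ok (board : List String) :
    ∀ (cs : List (Int × Int)) (D : PySem.Dict (Int × Int) Int) (dv : Int) (x : Int × Int),
      x ∈ (procP board cs D dv).1 → okAb board x = true ∧ D.contains x = false := by
  intro cs
  induction cs with
  | nil => intro D dv x hx; simp [procP] at hx
  | cons v cs ih =>
    intro D dv x hx
    by_cases hg : (okAb board v && !D.contains v) = true
    · simp only [procP, if_pos hg] at hx
      rcases List.mem_cons.mp hx with rfl | hx'
      · exact ⟨(Bool.and_eq_true_iff.mp hg).1, by
          have := (Bool.and_eq_true_iff.mp hg).2; simpa using this⟩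
      · obtain ⟨ho, hc⟩ := ih _ _ _ hx'
        refine ⟨ho, ?_⟩
        rw [PySem.Dict.contains_insert] at hc
        simpa using (Bool.or_eq_false_iff.mp hc).2
    · simp only [procP, if_neg hg] at hx
      exact ih _ _ _ hx

lemma proc_sub (board : List String) :
    ∀ (cs : List (Int × Int)) (D : PySem.Dict (Int × Int) Int) (dv : Int) (x : Int × Int),
      x ∈ (procP board cs D dv).1 → x ∈ cs := by
  intro cs
  induction cs with
  | nil => intro D dv x hx; simp [procP] at hx
  | cons v cs ih =>
    intro D dv x hx
    by_cases hg : (okAb board v && !D.contains v) = true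
    · simp only [procP, if_pos hg] at hx
      rcases List.mem_cons.mp hx with rfl | hx'
      · exact List.mem_cons_self
      · exact List.mem_cons_of_mem _ (ih _ _ _ hx')
    · simp only [procP, if_neg hg] at hx
      exact List.mem_cons_of_mem _ (ih _ _ _ hx)

lemma proc_contains_mono (board : List String) (cs : List (Int × Int))
    (D : PySem.Dict (Int × Int) Int) (dv : Int) (x : Int × Int)
    (h : D.contains x = true) : (procP board cs D dv).2.contains x = true := by
  rw [proc_contains, h]; rfl

lemma proc_complete (board : List String) :
    ∀ (cs : List (Int × Int)) (D : PySem.Dict (Int × Int) Int) (dv : Int) (x : Int × Int),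
      x ∈ cs → okAb board x = true → (procP board cs D dv).2.contains x = true := by
  intro cs
  induction cs with
  | nil => intro D dv x hx; cases hx
  | cons v cs ih =>
    intro D dv x hx hok
    by_cases hg : (okAb board v && !D.contains v) = true
    · simp only [procP, if_pos hg]
      rcases List.mem_cons.mp hx with rfl | hx'
      · exact proc_contains_mono board cs _ dv x (by rw [PySem.Dict.contains_insert]; simp)
      · exact ih _ _ _ hx' hok
    · simp only [procP, if_neg hg]
      rcases List.mem_cons.mp hx with rfl | hx'
      · have : D.contains x = true := by
          cases hDC : D.contains x
          · exact absurd (by simp [hok, hDC]) hg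
          · rfl
        exact proc_contains_mono board cs _ dv x this
      · exact ih _ _ _ hx' hok

lemma proc_getD_old (board : List String) :
    ∀ (cs : List (Int × Int)) (D : PySem.Dict (Int × Int) Int) (dv : Int) (x : Int × Int),
      D.contains x = true → (procP board cs D dv).2.getD x 0 = D.getD x 0 := by
  intro cs
  induction cs with
  | nil => intro D dv x _; simp [procP]
  | cons v cs ih =>
    intro D dv x hx
    by_cases hg : (okAb board v && !D.contains v) = true
    · have hvc : D.contains v = false := by
        have := (Bool.and_eq_true_iff.mp hg).2; simpa using this
      have hne : x ≠ v := by rintro rfl; rw [hx] at hvc; cases hvc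
      simp only [procP, if_pos hg]
      rw [ih _ _ _ (by rw [PySem.Dict.contains_insert]; simp [hx])]
      exact PySem.Dict.getD_insert_of_ne _ _ _ hne
    · simp only [procP, if_neg hg]
      exact ih _ _ _ hx

lemma proc_getD_new (board : List String) :
    ∀ (cs : List (Int × Int)) (D : PySem.Dict (Int × Int) Int) (dv : Int) (x : Int × Int),
      x ∈ (procP board cs D dv).1 → (procP board cs D dv).2.getD x 0 = dv := by
  intro cs
  induction cs with
  | nil => intro D dv x hx; simp [procP] at hx
  | cons v cs ih =>
    intro D dv x hx
    by_cases hg : (okAb board v && !D.contains v) = true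
    · simp only [procP, if_pos hg] at hx ⊢
      rcases List.mem_cons.mp hx with rfl | hx'
      · rw [proc_getD_old board cs _ dv x (by rw [PySem.Dict.contains_insert]; simp)]
        exact PySem.Dict.getD_insert_self _ _ _ _
      · exact ih _ _ _ hx'
    · simp only [procP, if_neg hg] at hx ⊢
      exact ih _ _ _ hx

lemma proc_cnt (board : List String) :
    ∀ (cs : List (Int × Int)) (D : PySem.Dict (Int × Int) Int) (dv : Int),
      cnt board (procP board cs D dv).2 + ((procP board cs D dv).1).length = cnt board D := by
  intro cs
  induction cs with
  | nil => intro D dv; simp [procP]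
  | cons v cs ih =>
    intro D dv
    by_cases hg : (okAb board v && !D.contains v) = true
    · obtain ⟨ho, hc⟩ := Bool.and_eq_true_iff.mp hg
      have hc' : D.contains v = false := by simpa using hc
      simp only [procP, if_pos hg, List.length_cons]
      have := ih (D.insert v dv) dv
      have h2 := cnt_insert (ok_mem_univ ho) hc' dv
      omega
    · simp only [procP, if_neg hg]
      exact ih D dv

-- ---- facts about mprocP ----
lemma mproc_cnt (board : List String) :
    ∀ (F : List (Int × Int)) (D : PySem.Dict (Int × Int) Int) (dv : Int),
      cnt board (mprocP board F D dv).2 + ((mprocP board F D dv).1).length = cnt board D := by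
  intro F
  induction F with
  | nil => intro D dv; simp [mprocP]
  | cons u F ih =>
    intro D dv
    simp only [mprocP, List.length_append]
    have h1 := proc_cnt board (candL u) D dv
    have h2 := ih (procP board (candL u) D dv).2 dv
    omega

lemma mproc_contains (board : List String) :
    ∀ (F : List (Int × Int)) (D : PySem.Dict (Int × Int) Int) (dv : Int) (x : Int × Int),
      ((mprocP board F D dv).2.contains x)
        = (D.contains x || decide (x ∈ (mprocP board F D dv).1)) := by
  intro F
  induction F with
  | nil => intro D dv x; simp [mprocP]
  | cons u F ih =>
    intro D dv x
    simp only [mprocP]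
    rw [ih, proc_contains]
    by_cases h1 : x ∈ (procP board (candL u) D dv).1 <;>
      by_cases h2 : x ∈ (mprocP board F (procP board (candL u) D dv).2 dv).1 <;>
        simp [h1, h2]

lemma mproc_contains_mono (board : List String) (F : List (Int × Int))
    (D : PySem.Dict (Int × Int) Int) (dv : Int) (x : Int × Int)
    (h : D.contains x = true) : (mprocP board F D dv).2.contains x = true := by
  rw [mproc_contains, h]; rfl

lemma mproc_new (board : List String) :
    ∀ (F : List (Int × Int)) (D : PySem.Dict (Int × Int) Int) (dv : Int) (x : Int × Int),
      x ∈ (mprocP board F D dv).1 →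
        okAb board x = true ∧ D.contains x = false ∧ ∃ u ∈ F, x ∈ candL u := by
  intro F
  induction F with
  | nil => intro D dv x hx; simp [mprocP] at hx
  | cons u F ih =>
    intro D dv x hx
    simp only [mprocP, List.mem_append] at hx
    rcases hx with hx | hx
    · obtain ⟨ho, hc⟩ := proc_fst_ok board _ _ _ _ hx
      exact ⟨ho, hc, u, List.mem_cons_self, proc_sub board _ _ _ _ hx⟩
    · obtain ⟨ho, hc, u', hu', hcand⟩ := ih _ _ _ hx
      refine ⟨ho, ?_, u', List.mem_cons_of_mem _ hu', hcand⟩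
      by_contra h
      have : D.contains x = true := by
        cases hD : D.contains x
        · exact absurd hD h
        · rfl
      rw [proc_contains_mono board _ _ _ _ this] at hc
      cases hc

lemma mproc_complete (board : List String) :
    ∀ (F : List (Int × Int)) (D : PySem.Dict (Int × Int) Int) (dv : Int)
      (u x : Int × Int), u ∈ F → x ∈ candL u → okAb board x = true →
      (mprocP board F D dv).2.contains x = true := by
  intro F
  induction F with
  | nil => intro D dv u x hu; cases hu
  | cons u0 F ih =>
    intro D dv u x hu hc hok
    simp only [mprocP]
    rcases List.mem_cons.mp hu with rfl | hu'
    · exact mproc_contains_mono board _ _ _ _ (proc_complete board _ _ _ _ hc hok)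
    · exact ih _ _ _ _ hu' hc hok

lemma mproc_getD_old (board : List String) :
    ∀ (F : List (Int × Int)) (D : PySem.Dict (Int × Int) Int) (dv : Int) (x : Int × Int),
      D.contains x = true → (mprocP board F D dv).2.getD x 0 = D.getD x 0 := by
  intro F
  induction F with
  | nil => intro D dv x _; simp [mprocP]
  | cons u F ih =>
    intro D dv x hx
    simp only [mprocP]
    rw [ih _ _ _ (proc_contains_mono board _ _ _ _ hx), proc_getD_old board _ _ _ _ hx]

lemma mproc_getD_new (board : List String) :
    ∀ (F : List (Int × Int)) (D : PySem.Dict (Int × Int) Int) (dv : Int) (x : Int × Int),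
      x ∈ (mprocP board F D dv).1 → (mprocP board F D dv).2.getD x 0 = dv := by
  intro F
  induction F with
  | nil => intro D dv x hx; simp [mprocP] at hx
  | cons u F ih =>
    intro D dv x hx
    simp only [mprocP, List.mem_append] at hx ⊢
    rcases hx with hx | hx
    · have hcont : (procP board (candL u) D dv).2.contains x = true := by
        rw [proc_contains]; simp [hx]
      rw [mproc_getD_old board _ _ _ _ hcont]
      exact proc_getD_new board _ _ _ _ hx
    · exact ih _ _ _ hx

-- ---- the reachability layers Sl and first-index fidx ----
def Sl (board : List String) (start : Int × Int) (k : Nat) : List (Int × Int) :=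
  (expandPre board)^[k] [start]

lemma mem_addNew :
    ∀ (l acc : List (Int × Int)) (x : Int × Int),
      x ∈ l.foldl (fun acc v => if v ∈ acc then acc else acc ++ [v]) acc ↔ x ∈ acc ∨ x ∈ l := by
  intro l
  induction l with
  | nil => intro acc x; simp
  | cons v l ih =>
    intro acc x
    simp only [List.foldl_cons]
    by_cases hv : v ∈ acc
    · rw [if_pos hv, ih]
      constructor
      · rintro (h | h)
        · exact Or.inl h
        · exact Or.inr (List.mem_cons_of_mem _ h)
      · rintro (h | h)
        · exact Or.inl h
        · rcases List.mem_cons.mp h with rfl | h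
          · exact Or.inl hv
          · exact Or.inr h
    · rw [if_neg hv, ih]
      simp only [List.mem_append, List.mem_singleton, List.mem_cons]
      tauto

lemma mem_expand (board : List String) (S : List (Int × Int)) (x : Int × Int) :
    x ∈ expandPre board S ↔
      x ∈ S ∨ (okAb board x = true ∧ ∃ u ∈ S, x ∈ candL u) := by
  have aux : ∀ (us acc : List (Int × Int)),
      x ∈ us.foldl (fun acc u =>
        ((candPre u).filter (okPre board)).foldl
          (fun acc v => if v ∈ acc then acc else acc ++ [v]) acc) acc ↔
      x ∈ acc ∨ ∃ u ∈ us, okAb board x = true ∧ x ∈ candL u := by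
    intro us
    induction us with
    | nil => intro acc; simp
    | cons u us ih =>
      intro acc
      simp only [List.foldl_cons]
      rw [ih]
      rw [mem_addNew]
      simp only [List.mem_filter, candPre_eq_candL, okPre_eq_okAb]
      constructor
      · rintro (( h | ⟨h1, h2⟩) | ⟨u', hu', h1, h2⟩)
        · exact Or.inl h
        · exact Or.inr ⟨u, List.mem_cons_self, h2, h1⟩
        · exact Or.inr ⟨u', List.mem_cons_of_mem _ hu', h1, h2⟩
      · rintro (h | ⟨u', hu', h1, h2⟩)
        · exact Or.inl (Or.inl h)
        · rcases List.mem_cons.mp hu' with rfl | hu'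
          · exact Or.inl (Or.inr ⟨h2, h1⟩)
          · exact Or.inr ⟨u', hu', h1, h2⟩
  rw [expandPre, aux]
  constructor
  · rintro (h | ⟨u, hu, h1, h2⟩)
    · exact Or.inl h
    · exact Or.inr ⟨h1, u, hu, h2⟩
  · rintro (h | ⟨h1, u, hu, h2⟩)
    · exact Or.inl h
    · exact Or.inr ⟨u, hu, h1, h2⟩

lemma Sl_zero (board : List String) (start : Int × Int) : Sl board start 0 = [start] := rfl

lemma Sl_succ (board : List String) (start : Int × Int) (k : Nat) :
    Sl board start (k + 1) = expandPre board (Sl board start k) :=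
  Function.iterate_succ_apply' _ _ _

lemma mem_Sl_succ (board : List String) (start : Int × Int) (k : Nat) (x : Int × Int) :
    x ∈ Sl board start (k + 1) ↔
      x ∈ Sl board start k ∨ (okAb board x = true ∧ ∃ u ∈ Sl board start k, x ∈ candL u) := by
  rw [Sl_succ, mem_expand]

lemma Sl_sub_succ (board : List String) (start : Int × Int) (k : Nat) :
    ∀ x ∈ Sl board start k, x ∈ Sl board start (k + 1) := by
  intro x hx
  rw [mem_Sl_succ]
  exact Or.inl hx

lemma Sl_mono (board : List String) (start : Int × Int) {j k : Nat} (h : j ≤ k) :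
    ∀ x ∈ Sl board start j, x ∈ Sl board start k := by
  induction k with
  | zero =>
    intro x hx
    have : j = 0 := by omega
    subst this; exact hx
  | succ k ih =>
    intro x hx
    rcases Nat.lt_or_ge j (k + 1) with h' | h'
    · exact Sl_sub_succ board start k x (ih (by omega) x hx)
    · have : j = k + 1 := by omega
      subst this; exact hx

lemma Sl_stab (board : List String) (start : Int × Int) (d : Nat)
    (h : ∀ x ∈ Sl board start (d + 1), x ∈ Sl board start d) :
    ∀ k, ∀ x ∈ Sl board start k, x ∈ Sl board start d := by
  have step : ∀ m, ∀ x ∈ Sl board start (d + m), x ∈ Sl board start d := by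
    intro m
    induction m with
    | zero => intro x hx; exact hx
    | succ m ih =>
      intro x hx
      rw [show d + (m + 1) = (d + m) + 1 by omega, mem_Sl_succ] at hx
      rcases hx with hx | ⟨hok, u, hu, hc⟩
      · exact ih x hx
      · refine h x ?_
        rw [mem_Sl_succ]
        exact Or.inr ⟨hok, u, ih u hu, hc⟩
  intro k x hx
  rcases Nat.lt_or_ge k d with h' | h'
  · exact Sl_mono board start (by omega) x hx
  · exact step (k - d) x (by rwa [show d + (k - d) = k by omega])

def fidx (board : List String) (start c : Int × Int) (d : Nat) : Prop :=
  c ∈ Sl board start d ∧ ∀ e, e < d → c ∉ Sl board start e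

lemma fidx_start (board : List String) (start : Int × Int) : fidx board start start 0 :=
  ⟨by rw [Sl_zero]; exact List.mem_singleton_self _, by omega⟩

lemma fidx_le_of_mem (board : List String) (start c : Int × Int) {d k : Nat}
    (hf : fidx board start c d) (hk : c ∈ Sl board start k) : d ≤ k := by
  by_contra h
  exact hf.2 k (by omega) hk

lemma fidx_exists (board : List String) (start c : Int × Int) {k : Nat}
    (h : c ∈ Sl board start k) : ∃ d, d ≤ k ∧ fidx board start c d := by
  have hex : ∃ e, c ∈ Sl board start e := ⟨k, h⟩
  refine ⟨Nat.find hex, Nat.find_min' hex h, Nat.find_spec hex, ?_⟩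
  intro e he
  exact Nat.find_min hex he

-- candL is symmetric
lemma candL_symm (u v : Int × Int) : v ∈ candL u ↔ u ∈ candL v := by
  obtain ⟨a, b⟩ := u; obtain ⟨c, d⟩ := v
  simp only [candL, List.mem_cons, List.mem_singleton, Prod.mk.injEq, List.not_mem_nil, or_false]
  omega

-- ---- A port reduces to the level-synchronous loop (the "bridge") ----
lemma validA_eq (u : Int × Int) (board : List String) :
    validNeighborsA u board = (candL u).filter (okAb board) := by
  rw [validNeighborsA]
  rw [PySem.List.foldl_append_ite_eq_filter]
  rfl

lemma innerA (board : List String) (u : Int × Int) :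
    ∀ (cs : List (Int × Int)) (q : List (Int × Int)) (D : PySem.Dict (Int × Int) Int)
      (P : PySem.Dict (Int × Int) (Int × Int)) (dep : Int),
      D.contains u = true → D.getD u 0 = dep →
      ∃ P', cs.foldl (fun s v => if okAb board v = true then
          (if s.2.1.contains v then s
           else (s.1 ++ [v], s.2.1.insert v (s.2.1.getD u 0 + 1), s.2.2.insert v u)) else s) (q, D, P)
        = (q ++ (procP board cs D (dep + 1)).1, (procP board cs D (dep + 1)).2, P') := by
  intro cs
  induction cs with
  | nil => intro q D P dep _ _; exact ⟨P, by simp [procP]⟩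
  | cons v cs ih =>
    intro q D P dep hu hd
    rw [List.foldl_cons]
    by_cases hok : okAb board v = true
    · by_cases hc : D.contains v = true
      · have hg : (okAb board v && !D.contains v) = false := by simp [hc]
        have happ : (fun (s : List (Int × Int) × PySem.Dict (Int × Int) Int × PySem.Dict (Int × Int) (Int × Int)) v => if okAb board v = true then
              (if s.2.1.contains v then s
               else (s.1 ++ [v], s.2.1.insert v (s.2.1.getD u 0 + 1), s.2.2.insert v u)) else s) (q, D, P) v
            = (q, D, P) := by simp [hok, hc]
        have hpr : procP board (v :: cs) D (dep + 1) = procP board cs D (dep + 1) := by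
          simp [procP, hg]
        simp only [happ, hpr]
        exact ih q D P dep hu hd
      · have hcf : D.contains v = false := by simpa using hc
        have hg : (okAb board v && !D.contains v) = true := by simp [hok, hcf]
        have hne : u ≠ v := by rintro rfl; rw [hu] at hcf; cases hcf
        have happ : (fun (s : List (Int × Int) × PySem.Dict (Int × Int) Int × PySem.Dict (Int × Int) (Int × Int)) v => if okAb board v = true then
              (if s.2.1.contains v then s
               else (s.1 ++ [v], s.2.1.insert v (s.2.1.getD u 0 + 1), s.2.2.insert v u)) else s) (q, D, P) v
            = (q ++ [v], D.insert v (dep + 1), P.insert v u) := by simp [hok, hc, hd]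
        have hpr : procP board (v :: cs) D (dep + 1)
            = (v :: (procP board cs (D.insert v (dep + 1)) (dep + 1)).1,
               (procP board cs (D.insert v (dep + 1)) (dep + 1)).2) := by
          simp [procP, hg]
        simp only [happ, hpr]
        obtain ⟨P', hP'⟩ := ih (q ++ [v]) (D.insert v (dep + 1)) (P.insert v u) dep
          (by rw [PySem.Dict.contains_insert]; simp [hu])
          (by rw [PySem.Dict.getD_insert_of_ne _ _ _ hne]; exact hd)
        refine ⟨P', ?_⟩
        rw [hP']
        simp [List.append_assoc]
    · have hg : (okAb board v && !D.contains v) = false := by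
        simp only [Bool.not_eq_true] at hok; simp [hok]
      have happ : (fun (s : List (Int × Int) × PySem.Dict (Int × Int) Int × PySem.Dict (Int × Int) (Int × Int)) v => if okAb board v = true then
            (if s.2.1.contains v then s
             else (s.1 ++ [v], s.2.1.insert v (s.2.1.getD u 0 + 1), s.2.2.insert v u)) else s) (q, D, P) v
          = (q, D, P) := by simp [hok]
      have hpr : procP board (v :: cs) D (dep + 1) = procP board cs D (dep + 1) := by
        simp [procP, hg]
      simp only [happ, hpr]
      exact ih q D P dep hu hd

lemma stepA (board : List String) (u : Int × Int) (q : List (Int × Int))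
    (D : PySem.Dict (Int × Int) Int) (P : PySem.Dict (Int × Int) (Int × Int)) (dep : Int)
    (hu : D.contains u = true) (hd : D.getD u 0 = dep) :
    ∃ P', (validNeighborsA u board).foldl
        (fun s v => if s.2.1.contains v then s
          else (s.1 ++ [v], s.2.1.insert v (s.2.1.getD u 0 + 1), s.2.2.insert v u)) (q, D, P)
      = (q ++ (procP board (candL u) D (dep + 1)).1, (procP board (candL u) D (dep + 1)).2, P') := by
  rw [validA_eq, List.foldl_filter]
  exact innerA board u (candL u) q D P dep hu hd

lemma innerB (board : List String) (dep : Int) :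
    ∀ (cs : List (Int × Int)) (acc : List (Int × Int)) (D : PySem.Dict (Int × Int) Int),
      cs.foldl (fun (s : List (Int × Int) × PySem.Dict (Int × Int) Int) v =>
        if ((0 ≤ v.1 ∧ v.1 < ((board.length : Int))) ∧
            (0 ≤ v.2 ∧ v.2 < PySem.Str.len ((PySem.List.pyGet? board 0).getD "")) ∧
            ((PySem.Str.pyGet? ((PySem.List.pyGet? board v.1).getD "") v.2).getD '#') ≠ '#') ∧
           ¬ s.2.contains v = true
        then (s.1 ++ [v], s.2.insert v (dep + 1)) else s) (acc, D)
      = (acc ++ (procP board cs D (dep + 1)).1, (procP board cs D (dep + 1)).2) := by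
  intro cs
  induction cs with
  | nil => intro acc D; simp [procP]
  | cons v cs ih =>
    intro acc D
    rw [List.foldl_cons]
    have hiff : (((0 ≤ v.1 ∧ v.1 < ((board.length : Int))) ∧
            (0 ≤ v.2 ∧ v.2 < PySem.Str.len ((PySem.List.pyGet? board 0).getD "")) ∧
            ((PySem.Str.pyGet? ((PySem.List.pyGet? board v.1).getD "") v.2).getD '#') ≠ '#') ∧
           ¬ D.contains v = true) ↔ (okAb board v && !D.contains v) = true := by
      simp [okAb, HH, WW]
    by_cases hg : (okAb board v && !D.contains v) = true
    · have hcf : D.contains v = false := by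
        have := (Bool.and_eq_true_iff.mp hg).2; simpa using this
      have happ : (fun (s : List (Int × Int) × PySem.Dict (Int × Int) Int) v =>
          if ((0 ≤ v.1 ∧ v.1 < ((board.length : Int))) ∧
              (0 ≤ v.2 ∧ v.2 < PySem.Str.len ((PySem.List.pyGet? board 0).getD "")) ∧
              ((PySem.Str.pyGet? ((PySem.List.pyGet? board v.1).getD "") v.2).getD '#') ≠ '#') ∧
             ¬ s.2.contains v = true
          then (s.1 ++ [v], s.2.insert v (dep + 1)) else s) (acc, D) v
          = (acc ++ [v], D.insert v (dep + 1)) := by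
        exact if_pos (hiff.mpr hg)
      have hpr : procP board (v :: cs) D (dep + 1)
          = (v :: (procP board cs (D.insert v (dep + 1)) (dep + 1)).1,
             (procP board cs (D.insert v (dep + 1)) (dep + 1)).2) := by
        simp [procP, hg]
      simp only [happ, hpr]; rw [ih (acc ++ [v]) (D.insert v (dep + 1))]
      simp [List.append_assoc]
    · have happ : (fun (s : List (Int × Int) × PySem.Dict (Int × Int) Int) v =>
          if ((0 ≤ v.1 ∧ v.1 < ((board.length : Int))) ∧
              (0 ≤ v.2 ∧ v.2 < PySem.Str.len ((PySem.List.pyGet? board 0).getD "")) ∧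
              ((PySem.Str.pyGet? ((PySem.List.pyGet? board v.1).getD "") v.2).getD '#') ≠ '#') ∧
             ¬ s.2.contains v = true
          then (s.1 ++ [v], s.2.insert v (dep + 1)) else s) (acc, D) v
          = (acc, D) := by
        exact if_neg (fun h => hg (hiff.mp h))
      have hgf : (okAb board v && !D.contains v) = false := by
        simpa using hg
      have hpr : procP board (v :: cs) D (dep + 1) = procP board cs D (dep + 1) := by
        simp [procP, hgf]
      simp only [happ, hpr]
      exact ih acc D

lemma lvlB (board : List String) (dep : Int) :
    ∀ (F : List (Int × Int)) (acc : List (Int × Int)) (D : PySem.Dict (Int × Int) Int),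
      F.foldl (fun (s : List (Int × Int) × PySem.Dict (Int × Int) Int) c =>
          [(c.1 - 1, c.2), (c.1 + 1, c.2), (c.1, c.2 - 1), (c.1, c.2 + 1)].foldl
            (fun (s : List (Int × Int) × PySem.Dict (Int × Int) Int) v =>
              if ((0 ≤ v.1 ∧ v.1 < ((board.length : Int))) ∧
                  (0 ≤ v.2 ∧ v.2 < PySem.Str.len ((PySem.List.pyGet? board 0).getD "")) ∧
                  ((PySem.Str.pyGet? ((PySem.List.pyGet? board v.1).getD "") v.2).getD '#') ≠ '#') ∧
                 ¬ s.2.contains v = true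
              then (s.1 ++ [v], s.2.insert v (dep + 1)) else s) s) (acc, D)
      = (acc ++ (mprocP board F D (dep + 1)).1, (mprocP board F D (dep + 1)).2) := by
  intro F
  induction F with
  | nil => intro acc D; simp [mprocP]
  | cons u F ih =>
    intro acc D
    rw [List.foldl_cons]
    have h1 := innerB board dep [(u.1 - 1, u.2), (u.1 + 1, u.2), (u.1, u.2 - 1), (u.1, u.2 + 1)] acc D
    simp only [h1, ih]
    simp only [mprocP, candL]
    simp [List.append_assoc]

-- ---- loop unfolding ----
lemma loopA_nil (board : List String) (fa : Nat) (D : PySem.Dict (Int × Int) Int)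
    (P : PySem.Dict (Int × Int) (Int × Int)) : bfsLoopA board fa [] D P = D := by
  cases fa <;> rfl

lemma loopB_nil (board : List String) (h w : Int) (fb : Nat) (D : PySem.Dict (Int × Int) Int)
    (dep : Int) : bfsLevelB board h w fb [] D dep = D := by
  cases fb <;> rfl

lemma loopA_cons (board : List String) (fa : Nat) (u : Int × Int) (q : List (Int × Int))
    (D : PySem.Dict (Int × Int) Int) (P : PySem.Dict (Int × Int) (Int × Int)) :
    bfsLoopA board (fa + 1) (u :: q) D P =
      bfsLoopA board fa
        ((validNeighborsA u board).foldl
          (fun s v => if s.2.1.contains v then s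
            else (s.1 ++ [v], s.2.1.insert v (s.2.1.getD u 0 + 1), s.2.2.insert v u)) (q, D, P)).1
        ((validNeighborsA u board).foldl
          (fun s v => if s.2.1.contains v then s
            else (s.1 ++ [v], s.2.1.insert v (s.2.1.getD u 0 + 1), s.2.2.insert v u)) (q, D, P)).2.1
        ((validNeighborsA u board).foldl
          (fun s v => if s.2.1.contains v then s
            else (s.1 ++ [v], s.2.1.insert v (s.2.1.getD u 0 + 1), s.2.2.insert v u)) (q, D, P)).2.2 := rfl

lemma loopB_cons (board : List String) (h w : Int) (fb : Nat) (c : Int × Int)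
    (fr : List (Int × Int)) (D : PySem.Dict (Int × Int) Int) (dep : Int) :
    bfsLevelB board h w (fb + 1) (c :: fr) D dep =
      bfsLevelB board h w fb
        ((c :: fr).foldl
          (fun (s : List (Int × Int) × PySem.Dict (Int × Int) Int) c =>
            [(c.1 - 1, c.2), (c.1 + 1, c.2), (c.1, c.2 - 1), (c.1, c.2 + 1)].foldl
              (fun (s : List (Int × Int) × PySem.Dict (Int × Int) Int) v =>
                if ((0 ≤ v.1 ∧ v.1 < h) ∧ (0 ≤ v.2 ∧ v.2 < w) ∧
                    ((PySem.Str.pyGet? ((PySem.List.pyGet? board v.1).getD "") v.2).getD '#') ≠ '#') ∧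
                  ¬ s.2.contains v = true
                then (s.1 ++ [v], s.2.insert v (dep + 1)) else s) s) ([], D)).1
        ((c :: fr).foldl
          (fun (s : List (Int × Int) × PySem.Dict (Int × Int) Int) c =>
            [(c.1 - 1, c.2), (c.1 + 1, c.2), (c.1, c.2 - 1), (c.1, c.2 + 1)].foldl
              (fun (s : List (Int × Int) × PySem.Dict (Int × Int) Int) v =>
                if ((0 ≤ v.1 ∧ v.1 < h) ∧ (0 ≤ v.2 ∧ v.2 < w) ∧
                    ((PySem.Str.pyGet? ((PySem.List.pyGet? board v.1).getD "") v.2).getD '#') ≠ '#') ∧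
                  ¬ s.2.contains v = true
                then (s.1 ++ [v], s.2.insert v (dep + 1)) else s) s) ([], D)).2
        (dep + 1) := rfl

lemma loopB_fuel (board : List String) :
    ∀ (k : Nat) (F : List (Int × Int)) (D : PySem.Dict (Int × Int) Int) (dep : Int) (fb fb' : Nat),
      cnt board D ≤ k → cnt board D + 2 ≤ fb → cnt board D + 2 ≤ fb' →
      bfsLevelB board (board.length : Int) (PySem.Str.len ((PySem.List.pyGet? board 0).getD "")) fb F D dep
        = bfsLevelB board (board.length : Int) (PySem.Str.len ((PySem.List.pyGet? board 0).getD "")) fb' F D dep := by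
  intro k
  induction k with
  | zero =>
    intro F D dep fb fb' hk h1 h2
    cases F with
    | nil => rw [loopB_nil, loopB_nil]
    | cons c fr =>
      obtain ⟨a, rfl⟩ : ∃ j, fb = j + 1 := ⟨fb - 1, by omega⟩
      obtain ⟨b, rfl⟩ : ∃ j, fb' = j + 1 := ⟨fb' - 1, by omega⟩
      rw [loopB_cons, loopB_cons]
      have hlvl := lvlB board dep (c :: fr) [] D
      simp only [hlvl, List.nil_append]
      have hcnt := mproc_cnt board (c :: fr) D (dep + 1)
      have hempty : (mprocP board (c :: fr) D (dep + 1)).1 = [] := by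
        have : ((mprocP board (c :: fr) D (dep + 1)).1).length = 0 := by omega
        exact List.length_eq_zero_iff.mp this
      rw [hempty, loopB_nil, loopB_nil]
  | succ k ih =>
    intro F D dep fb fb' hk h1 h2
    cases F with
    | nil => rw [loopB_nil, loopB_nil]
    | cons c fr =>
      obtain ⟨a, rfl⟩ : ∃ j, fb = j + 1 := ⟨fb - 1, by omega⟩
      obtain ⟨b, rfl⟩ : ∃ j, fb' = j + 1 := ⟨fb' - 1, by omega⟩
      rw [loopB_cons, loopB_cons]
      have hlvl := lvlB board dep (c :: fr) [] D
      simp only [hlvl, List.nil_append]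
      have hcnt := mproc_cnt board (c :: fr) D (dep + 1)
      by_cases hempty : (mprocP board (c :: fr) D (dep + 1)).1 = []
      · rw [hempty, loopB_nil, loopB_nil]
      · have hlen : 1 ≤ ((mprocP board (c :: fr) D (dep + 1)).1).length := by
          cases hm1 : (mprocP board (c :: fr) D (dep + 1)).1 with
          | nil => exact absurd hm1 hempty
          | cons x xs => simp [hm1]
        exact ih _ _ _ a b (by omega) (by omega) (by omega)

lemma bridge (board : List String) :
    ∀ (n : Nat) (F G : List (Int × Int)) (D : PySem.Dict (Int × Int) Int)
      (P : PySem.Dict (Int × Int) (Int × Int)) (fa fb : Nat) (dep : Int),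
      2 * (cnt board D + F.length + G.length) + (if F = [] then 1 else 0) ≤ n →
      (∀ u ∈ F, D.contains u = true ∧ D.getD u 0 = dep) →
      (∀ v ∈ G, D.contains v = true ∧ D.getD v 0 = dep + 1) →
      cnt board D + F.length + G.length + 1 ≤ fa →
      cnt board D + 2 ≤ fb →
      bfsLoopA board fa (F ++ G) D P
        = bfsLevelB board (board.length : Int) (PySem.Str.len ((PySem.List.pyGet? board 0).getD "")) fb
            (G ++ (mprocP board F D (dep + 1)).1) (mprocP board F D (dep + 1)).2 (dep + 1) := by
  intro n
  induction n with
  | zero =>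
    intro F G D P fa fb dep hM _ _ _ _
    exfalso
    cases F with
    | nil => simp at hM
    | cons u F0 => simp at hM
  | succ n ih =>
    intro F G D P fa fb dep hM hF hG hfa hfb
    cases F with
    | cons u F0 =>
      obtain ⟨fa0, rfl⟩ : ∃ j, fa = j + 1 := ⟨fa - 1, by omega⟩
      rw [List.cons_append, loopA_cons]
      obtain ⟨hu, hd⟩ := hF u (List.mem_cons_self)
      obtain ⟨P', hP'⟩ := stepA board u (F0 ++ G) D P dep hu hd
      simp only [hP']
      have hcnt := proc_cnt board (candL u) D (dep + 1)
      have hIH := ih F0 (G ++ (procP board (candL u) D (dep + 1)).1)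
        (procP board (candL u) D (dep + 1)).2 P' fa0 fb dep ?_ ?_ ?_ ?_ ?_
      · rw [List.append_assoc]
        rw [hIH]
        simp only [mprocP, List.append_assoc]
      · have hflag : (if F0 = [] then 1 else 0) ≤ 1 := by split <;> omega
        simp only [List.length_cons] at hM
        rw [if_neg (by simp : ¬(u :: F0 = []))] at hM
        simp only [List.length_append]
        omega
      · intro u' hu'
        obtain ⟨h1, h2⟩ := hF u' (List.mem_cons_of_mem _ hu')
        refine ⟨by rw [proc_contains]; simp [h1], ?_⟩
        rw [proc_getD_old board _ _ _ _ h1]; exact h2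
      · intro v hv
        rcases List.mem_append.mp hv with hv | hv
        · obtain ⟨h1, h2⟩ := hG v hv
          refine ⟨by rw [proc_contains]; simp [h1], ?_⟩
          rw [proc_getD_old board _ _ _ _ h1]; exact h2
        · refine ⟨by rw [proc_contains]; simp [hv], ?_⟩
          exact proc_getD_new board _ _ _ _ hv
      · simp only [List.length_append]
        simp only [List.length_cons] at hfa
        omega
      · omega
    | nil =>
      simp only [mprocP, List.append_nil, List.nil_append]
      cases G with
      | nil => rw [loopA_nil, loopB_nil]
      | cons v G0 =>
        obtain ⟨fb0, rfl⟩ : ∃ j, fb = j + 1 := ⟨fb - 1, by omega⟩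
        rw [loopB_cons]
        have hlvl := lvlB board (dep + 1) (v :: G0) [] D
        simp only [hlvl, List.nil_append]
        have hIH := ih (v :: G0) [] D P fa (cnt board D + 2) (dep + 1) ?_ ?_ (by simp) ?_ (le_refl _)
        · simp only [List.append_nil, List.nil_append] at hIH
          rw [hIH]
          have hcnt := mproc_cnt board (v :: G0) D (dep + 1 + 1)
          by_cases hempty : (mprocP board (v :: G0) D (dep + 1 + 1)).1 = []
          · rw [hempty, loopB_nil, loopB_nil]
          · have hlen : 1 ≤ ((mprocP board (v :: G0) D (dep + 1 + 1)).1).length := by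
              cases hm1 : (mprocP board (v :: G0) D (dep + 1 + 1)).1 with
              | nil => exact absurd hm1 hempty
              | cons x xs => simp [hm1]
            exact loopB_fuel board (cnt board (mprocP board (v :: G0) D (dep + 1 + 1)).2)
              _ _ _ _ _ (le_refl _) (by omega) (by omega)
        · simp at hM ⊢
          omega
        · exact hG
        · simp only [List.length_cons, List.length_nil] at hfa ⊢
          omega

lemma bfs_eq (board : List String) (start : Int × Int) :
    bfsA start board
      = bfsLevelB board (board.length : Int) (PySem.Str.len ((PySem.List.pyGet? board 0).getD ""))
          (board.length * ((PySem.List.pyGet? board 0).getD "").toList.length + 2)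
          [start] (PySem.Dict.ofList [(start, 0)]) 0 := by
  have hof : PySem.Dict.ofList [((start : Int × Int), (0 : Int))] = PySem.Dict.empty.insert start 0 := rfl
  have hcs : (PySem.Dict.ofList [((start : Int × Int), (0 : Int))]).contains start = true := by
    rw [hof]; exact PySem.Dict.contains_insert_self _ _ _
  have hgd : (PySem.Dict.ofList [((start : Int × Int), (0 : Int))]).getD start 0 = 0 := by
    rw [hof]; exact PySem.Dict.getD_insert_self _ _ _ _
  have hcle : cnt board (PySem.Dict.ofList [((start : Int × Int), (0 : Int))])
      ≤ board.length * ((PySem.List.pyGet? board 0).getD "").toList.length := by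
    have := cnt_le board (PySem.Dict.ofList [((start : Int × Int), (0 : Int))])
    simpa [wN] using this
  have h := bridge board (2 * (cnt board (PySem.Dict.ofList [((start : Int × Int), (0 : Int))]) + 1) + 1)
      [] [start] (PySem.Dict.ofList [(start, 0)]) PySem.Dict.empty
      (board.length * ((PySem.List.pyGet? board 0).getD "").toList.length + 2)
      (board.length * ((PySem.List.pyGet? board 0).getD "").toList.length + 2) (-1)
      (by simp) (by simp)
      (by intro v hv
          simp only [List.mem_singleton] at hv
          subst hv
          exact ⟨hcs, by rw [hgd]; norm_num⟩)
      (by simp only [List.length_nil, List.length_cons]; omega)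
      (by omega)
  unfold bfsA
  simp only [List.nil_append, mprocP, List.append_nil] at h
  norm_num at h
  exact h

-- ---- the lvl (level-synchronous) invariant and BFS correctness ----
def BfsInv (board : List String) (start : Int × Int) (dep : Nat)
    (F : List (Int × Int)) (D : PySem.Dict (Int × Int) Int) : Prop :=
  (∀ c, D.contains c = true ↔ c ∈ Sl board start dep) ∧
  (∀ c dn, fidx board start c dn → dn ≤ dep → D.getD c 0 = (dn : Int)) ∧
  (∀ c, c ∈ F ↔ fidx board start c dep)

lemma BfsInv_step (board : List String) (start : Int × Int) (dep : Nat)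
    (F : List (Int × Int)) (D : PySem.Dict (Int × Int) Int)
    (hI : BfsInv board start dep F D) :
    BfsInv board start (dep + 1) (mprocP board F D ((dep : Int) + 1)).1
      (mprocP board F D ((dep : Int) + 1)).2 := by
  obtain ⟨hcon, hval, hfr⟩ := hI
  have key : ∀ c, (mprocP board F D ((dep : Int) + 1)).2.contains c = true ↔
      c ∈ Sl board start (dep + 1) := by
    intro c
    constructor
    · intro h
      rw [mproc_contains] at h
      rcases Bool.or_eq_true_iff.mp h with h | h
      · exact Sl_sub_succ board start dep c ((hcon c).mp h)
      · obtain ⟨hok, _, u, hu, hcand⟩ := mproc_new board F D _ c (of_decide_eq_true h)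
        exact (mem_Sl_succ board start dep c).mpr (Or.inr ⟨hok, u, ((hfr u).mp hu).1, hcand⟩)
    · intro h
      rcases (mem_Sl_succ board start dep c).mp h with h | ⟨hok, u, hu, hcand⟩
      · exact mproc_contains_mono board F D _ c ((hcon c).mpr h)
      · obtain ⟨du, hdu, hf⟩ := fidx_exists board start u hu
        rcases Nat.lt_or_ge du dep with hlt | hge
        · have hcd : c ∈ Sl board start (du + 1) :=
            (mem_Sl_succ board start du c).mpr (Or.inr ⟨hok, u, hf.1, hcand⟩)
          have hmem : c ∈ Sl board start dep := Sl_mono board start (by omega) c hcd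
          exact mproc_contains_mono board F D _ c ((hcon c).mpr hmem)
        · have hde : du = dep := by omega
          subst hde
          exact mproc_complete board F D _ u c ((hfr u).mpr hf) hcand hok
  refine ⟨key, ?_, ?_⟩
  · intro c dn hf hdn
    rcases Nat.lt_or_ge dep dn with hgt | hle
    · have hdn' : dn = dep + 1 := by omega
      subst hdn'
      have hcM : (mprocP board F D ((dep : Int) + 1)).2.contains c = true := (key c).mpr hf.1
      have hDc : D.contains c = false := by
        cases hD : D.contains c
        · rfl
        · exact absurd ((hcon c).mp hD) (hf.2 dep (by omega))
      rw [mproc_contains, hDc] at hcM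
      have hmem : c ∈ (mprocP board F D ((dep : Int) + 1)).1 :=
        of_decide_eq_true (by simpa using hcM)
      rw [mproc_getD_new board F D _ c hmem]
      push_cast; ring
    · have hcd : D.contains c = true := (hcon c).mpr (Sl_mono board start hle c hf.1)
      rw [mproc_getD_old board F D _ c hcd]
      exact hval c dn hf hle
  · intro c
    constructor
    · intro h
      obtain ⟨hok, hDc, u, hu, hcand⟩ := mproc_new board F D _ c h
      refine ⟨(mem_Sl_succ board start dep c).mpr (Or.inr ⟨hok, u, ((hfr u).mp hu).1, hcand⟩), ?_⟩
      intro e he hce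
      have hmem : c ∈ Sl board start dep := Sl_mono board start (by omega) c hce
      rw [(hcon c).mpr hmem] at hDc
      cases hDc
    · intro hf
      have hcM : (mprocP board F D ((dep : Int) + 1)).2.contains c = true := (key c).mpr hf.1
      rw [mproc_contains] at hcM
      rcases Bool.or_eq_true_iff.mp hcM with h | h
      · exact absurd ((hcon c).mp h) (hf.2 dep (by omega))
      · exact of_decide_eq_true h

lemma BfsInv_empty_final (board : List String) (start : Int × Int) (dep : Nat)
    (D : PySem.Dict (Int × Int) Int) (hI : BfsInv board start dep [] D) :
    ∀ c dn, fidx board start c dn → D.getD c 0 = (dn : Int) := by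
  obtain ⟨hcon, hval, hfr⟩ := hI
  have hnofix : ∀ c, ¬ fidx board start c dep := by
    intro c h
    have := (hfr c).mpr h
    simp at this
  cases dep with
  | zero => exact absurd (fidx_start board start) (hnofix start)
  | succ e =>
    have hsub : ∀ x ∈ Sl board start (e + 1), x ∈ Sl board start e := by
      intro x hx
      obtain ⟨d, hd, hfd⟩ := fidx_exists board start x hx
      rcases Nat.lt_or_ge d (e + 1) with hlt | hge
      · exact Sl_mono board start (by omega) x hfd.1
      · have : d = e + 1 := by omega
        subst this
        exact absurd hfd (hnofix x)
    intro c dn hf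
    have hmem : c ∈ Sl board start e := Sl_stab board start e hsub dn c hf.1
    have hle : dn ≤ e := fidx_le_of_mem board start c hf hmem
    exact hval c dn hf (by omega)

lemma lvl_run (board : List String) (start : Int × Int) :
    ∀ (k : Nat) (dep : Nat) (F : List (Int × Int)) (D : PySem.Dict (Int × Int) Int) (fuel : Nat),
      cnt board D ≤ k → cnt board D + 2 ≤ fuel → BfsInv board start dep F D →
      ∀ c dn, fidx board start c dn →
        (bfsLevelB board (board.length : Int)
          (PySem.Str.len ((PySem.List.pyGet? board 0).getD "")) fuel F D (dep : Int)).getD c 0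
          = (dn : Int) := by
  intro k
  induction k with
  | zero =>
    intro dep F D fuel hk hfuel hI c dn hf
    cases F with
    | nil =>
      rw [loopB_nil]
      exact BfsInv_empty_final board start dep D hI c dn hf
    | cons u F0 =>
      obtain ⟨a, rfl⟩ : ∃ j, fuel = j + 1 := ⟨fuel - 1, by omega⟩
      rw [loopB_cons]
      have hlvl := lvlB board (dep : Int) (u :: F0) [] D
      simp only [hlvl, List.nil_append]
      have hcnt := mproc_cnt board (u :: F0) D ((dep : Int) + 1)
      have hempty : (mprocP board (u :: F0) D ((dep : Int) + 1)).1 = [] := by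
        have : ((mprocP board (u :: F0) D ((dep : Int) + 1)).1).length = 0 := by omega
        exact List.length_eq_zero_iff.mp this
      rw [hempty, loopB_nil]
      have hstep := BfsInv_step board start dep (u :: F0) D hI
      rw [hempty] at hstep
      exact BfsInv_empty_final board start (dep + 1) _ hstep c dn hf
  | succ k ih =>
    intro dep F D fuel hk hfuel hI c dn hf
    cases F with
    | nil =>
      rw [loopB_nil]
      exact BfsInv_empty_final board start dep D hI c dn hf
    | cons u F0 =>
      obtain ⟨a, rfl⟩ : ∃ j, fuel = j + 1 := ⟨fuel - 1, by omega⟩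
      rw [loopB_cons]
      have hlvl := lvlB board (dep : Int) (u :: F0) [] D
      simp only [hlvl, List.nil_append]
      have hcnt := mproc_cnt board (u :: F0) D ((dep : Int) + 1)
      have hstep := BfsInv_step board start dep (u :: F0) D hI
      by_cases hempty : (mprocP board (u :: F0) D ((dep : Int) + 1)).1 = []
      · rw [hempty, loopB_nil]
        rw [hempty] at hstep
        exact BfsInv_empty_final board start (dep + 1) _ hstep c dn hf
      · have hlen : 1 ≤ ((mprocP board (u :: F0) D ((dep : Int) + 1)).1).length := by
          cases hm1 : (mprocP board (u :: F0) D ((dep : Int) + 1)).1 with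
          | nil => exact absurd hm1 hempty
          | cons x xs => simp [hm1]
        have hcast : ((dep : Int) + 1) = ((dep + 1 : Nat) : Int) := by push_cast; ring
        rw [hcast] at hcnt hlen hstep ⊢
        exact ih (dep + 1) _ _ a (by omega) (by omega) hstep c dn hf

lemma A_final (board : List String) (start c : Int × Int) (dn : Nat)
    (h : fidx board start c dn) : (bfsA start board).getD c 0 = (dn : Int) := by
  rw [bfs_eq]
  have hI : BfsInv board start 0 [start] (PySem.Dict.ofList [(start, 0)]) := by
    have hof : PySem.Dict.ofList [((start : Int × Int), (0 : Int))]
        = PySem.Dict.empty.insert start 0 := rfl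
    refine ⟨?_, ?_, ?_⟩
    · intro x
      rw [hof, PySem.Dict.contains_insert, Sl_zero]
      constructor
      · intro hx
        simp only [PySem.Dict.contains_empty, Bool.or_false, beq_iff_eq] at hx
        simp [hx]
      · intro hx
        simp only [List.mem_singleton] at hx
        subst hx
        simp
    · intro x dxn hfx hdx
      have hdx0 : dxn = 0 := by omega
      subst hdx0
      have : x ∈ Sl board start 0 := hfx.1
      rw [Sl_zero] at this
      simp only [List.mem_singleton] at this
      subst this
      rw [hof, PySem.Dict.getD_insert_self]
      rfl
    · intro x
      constructor
      · intro hx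
        simp only [List.mem_singleton] at hx
        rw [hx]
        exact fidx_start board start
      · intro hfx
        have := hfx.1
        rwa [Sl_zero] at this
  have hcle := cnt_le board (PySem.Dict.ofList [((start : Int × Int), (0 : Int))])
  have hz : ((0 : Nat) : Int) = (0 : Int) := rfl
  have := lvl_run board start (cnt board (PySem.Dict.ofList [(start, 0)])) 0 [start]
    (PySem.Dict.ofList [(start, 0)])
    (board.length * ((PySem.List.pyGet? board 0).getD "").toList.length + 2)
    (le_refl _) (by
      have : cnt board (PySem.Dict.ofList [((start : Int × Int), (0 : Int))])
          ≤ board.length * wN board := hcle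
      simp only [wN] at this
      omega) hI c dn h
  rw [hz] at this
  exact this

-- ---- B-side: relaxation correctness ----
def LBp (board : List String) (start : Int × Int) (D : PySem.Dict (Int × Int) Int) : Prop :=
  ∀ c, D.contains c = true → ∃ dn : Nat, D.getD c 0 = (dn : Int) ∧ c ∈ Sl board start dn

def UBp (board : List String) (start : Int × Int) (k : Nat)
    (D : PySem.Dict (Int × Int) Int) : Prop :=
  ∀ c dn, fidx board start c dn → dn ≤ k →
    D.contains c = true ∧ D.getD c 0 ≤ (dn : Int)

def Mo (D D' : PySem.Dict (Int × Int) Int) : Prop :=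
  ∀ c, D.contains c = true → D'.contains c = true ∧ D'.getD c 0 ≤ D.getD c 0

lemma Mo_refl (D : PySem.Dict (Int × Int) Int) : Mo D D := fun c h => ⟨h, le_refl _⟩

lemma Mo_trans {D1 D2 D3 : PySem.Dict (Int × Int) Int} (h1 : Mo D1 D2) (h2 : Mo D2 D3) :
    Mo D1 D3 := by
  intro c hc
  obtain ⟨hc2, hv2⟩ := h1 c hc
  obtain ⟨hc3, hv3⟩ := h2 c hc2
  exact ⟨hc3, le_trans hv3 hv2⟩

-- the per-neighbour relaxation step of sweepAlt
def stepB (c : Int × Int) (s : PySem.Dict (Int × Int) Int × Bool) (v : Int × Int) :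
    PySem.Dict (Int × Int) Int × Bool :=
  if s.1.contains v = true ∧ (¬ s.1.contains c = true ∨ s.1.getD v 0 + 1 < s.1.getD c 0)
  then (s.1.insert c (s.1.getD v 0 + 1), true) else s

lemma sweepAlt_eq (cells : List (Int × Int)) (s0 : PySem.Dict (Int × Int) Int × Bool) :
    sweepAlt cells s0 = cells.foldl (fun s c => (candL c).foldl (stepB c) s) s0 := rfl

lemma stepB_other (c : Int × Int) (s : PySem.Dict (Int × Int) Int × Bool) (v x : Int × Int)
    (hx : x ≠ c) :
    ((stepB c s v).1.contains x = s.1.contains x ∧ (stepB c s v).1.getD x 0 = s.1.getD x 0) := by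
  unfold stepB
  split_ifs with h
  · exact ⟨by rw [PySem.Dict.contains_insert]; simp [beq_eq_false_iff_ne.mpr hx],
      PySem.Dict.getD_insert_of_ne _ _ _ hx⟩
  · exact ⟨rfl, rfl⟩

lemma stepB_Mo (c : Int × Int) (s : PySem.Dict (Int × Int) Int × Bool) (v : Int × Int) :
    Mo s.1 (stepB c s v).1 := by
  intro x hx
  by_cases hxc : x = c
  · subst hxc
    unfold stepB
    split_ifs with h
    · refine ⟨by rw [PySem.Dict.contains_insert]; simp, ?_⟩
      rw [PySem.Dict.getD_insert_self]
      rcases h.2 with h2 | h2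
      · exact absurd hx h2
      · omega
    · exact ⟨hx, le_refl _⟩
  · obtain ⟨h1, h2⟩ := stepB_other c s v x hxc
    rw [h1, h2]
    exact ⟨hx, le_refl _⟩

lemma relaxCell_Mo (c : Int × Int) :
    ∀ (l : List (Int × Int)) (s : PySem.Dict (Int × Int) Int × Bool),
      Mo s.1 (l.foldl (stepB c) s).1 := by
  intro l
  induction l with
  | nil => intro s; exact Mo_refl _
  | cons v l ih =>
    intro s
    exact Mo_trans (stepB_Mo c s v) (ih (stepB c s v))

lemma stepB_le (c : Int × Int) (s : PySem.Dict (Int × Int) Int × Bool) (v : Int × Int)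
    (K : Int) (hv : s.1.contains v = true) (hle : s.1.getD v 0 ≤ K) :
    (stepB c s v).1.contains c = true ∧ (stepB c s v).1.getD c 0 ≤ K + 1 := by
  unfold stepB
  split_ifs with h
  · refine ⟨by rw [PySem.Dict.contains_insert]; simp, ?_⟩
    rw [PySem.Dict.getD_insert_self]; omega
  · have h2 : s.1.contains c = true ∧ ¬(s.1.getD v 0 + 1 < s.1.getD c 0) := by
      by_cases hcc : s.1.contains c = true
      · refine ⟨hcc, fun hlt => h ⟨hv, Or.inr hlt⟩⟩
      · exact absurd ⟨hv, Or.inl hcc⟩ h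
    exact ⟨h2.1, by omega⟩

lemma relaxCell_le (c : Int × Int) :
    ∀ (l : List (Int × Int)) (s : PySem.Dict (Int × Int) Int × Bool) (v : Int × Int) (K : Int),
      v ∈ l → s.1.contains v = true → s.1.getD v 0 ≤ K →
      (l.foldl (stepB c) s).1.contains c = true ∧ (l.foldl (stepB c) s).1.getD c 0 ≤ K + 1 := by
  intro l
  induction l with
  | nil => intro s v K hv; cases hv
  | cons v0 l ih =>
    intro s v K hv hc hle
    rcases List.mem_cons.mp hv with rfl | hv'
    · obtain ⟨h1, h2⟩ := stepB_le c s v K hc hle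
      simp only [List.foldl_cons]
      obtain ⟨h1', h2'⟩ := relaxCell_Mo c l (stepB c s v) c h1
      exact ⟨h1', by omega⟩
    · simp only [List.foldl_cons]
      obtain ⟨hc', hle'⟩ := stepB_Mo c s v0 v hc
      exact ih (stepB c s v0) v K hv' hc' (by omega)

lemma relaxFold_Mo :
    ∀ (l : List (Int × Int)) (s : PySem.Dict (Int × Int) Int × Bool),
      Mo s.1 ((l.foldl (fun s c => (candL c).foldl (stepB c) s) s)).1 := by
  intro l
  induction l with
  | nil => intro s; exact Mo_refl _
  | cons c l ih =>
    intro s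
    exact Mo_trans (relaxCell_Mo c (candL c) s) (ih _)

lemma sweep_Mo (cells : List (Int × Int)) (s : PySem.Dict (Int × Int) Int × Bool) :
    Mo s.1 (sweepAlt cells s).1 := by
  rw [sweepAlt_eq]
  exact relaxFold_Mo cells s

lemma relaxFold_reach :
    ∀ (cells : List (Int × Int)) (s : PySem.Dict (Int × Int) Int × Bool)
      (c u : Int × Int) (K : Int),
      c ∈ cells → u ∈ candL c → s.1.contains u = true → s.1.getD u 0 ≤ K →
      ((cells.foldl (fun s c => (candL c).foldl (stepB c) s) s)).1.contains c = true ∧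
      ((cells.foldl (fun s c => (candL c).foldl (stepB c) s) s)).1.getD c 0 ≤ K + 1 := by
  intro cells
  induction cells with
  | nil => intro s c u K hc; cases hc
  | cons c0 cells ih =>
    intro s c u K hc hu h1 h2
    simp only [List.foldl_cons]
    rcases List.mem_cons.mp hc with rfl | hc'
    · obtain ⟨g1, g2⟩ := relaxCell_le c (candL c) s u K hu h1 h2
      obtain ⟨m1, m2⟩ := relaxFold_Mo cells ((candL c).foldl (stepB c) s) c g1
      exact ⟨m1, by omega⟩
    · obtain ⟨h1', h2'⟩ := relaxCell_Mo c0 (candL c0) s u h1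
      exact ih _ c u K hc' hu h1' (by omega)

lemma sweep_reach (cells : List (Int × Int)) (s : PySem.Dict (Int × Int) Int × Bool)
    (c u : Int × Int) (K : Int) (hc : c ∈ cells) (hu : u ∈ candL c)
    (h1 : s.1.contains u = true) (h2 : s.1.getD u 0 ≤ K) :
    (sweepAlt cells s).1.contains c = true ∧ (sweepAlt cells s).1.getD c 0 ≤ K + 1 := by
  rw [sweepAlt_eq]
  exact relaxFold_reach cells s c u K hc hu h1 h2

lemma stepB_LB (board : List String) (start c v : Int × Int) (hok : okAb board c = true)
    (hv : v ∈ candL c) (s : PySem.Dict (Int × Int) Int × Bool)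
    (hLB : LBp board start s.1) : LBp board start (stepB c s v).1 := by
  intro x hx
  unfold stepB at hx ⊢
  split_ifs at hx ⊢ with hg
  · by_cases hxc : x = c
    · obtain ⟨dnv, hval, hmem⟩ := hLB v hg.1
      refine ⟨dnv + 1, ?_, ?_⟩
      · rw [hxc, PySem.Dict.getD_insert_self, hval]; push_cast; ring
      · rw [hxc]
        exact (mem_Sl_succ board start dnv c).mpr
          (Or.inr ⟨hok, v, hmem, (candL_symm c v).mp hv⟩)
    · rw [PySem.Dict.contains_insert] at hx
      have hx' : s.1.contains x = true := by
        rcases Bool.or_eq_true_iff.mp hx with h | h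
        · exact absurd (by simpa using h) hxc
        · exact h
      obtain ⟨dn, hval, hmem⟩ := hLB x hx'
      exact ⟨dn, by rw [PySem.Dict.getD_insert_of_ne _ _ _ hxc]; exact hval, hmem⟩
  · exact hLB x hx

lemma relaxCell_LB (board : List String) (start c : Int × Int) (hok : okAb board c = true) :
    ∀ (l : List (Int × Int)), (∀ v ∈ l, v ∈ candL c) →
      ∀ (s : PySem.Dict (Int × Int) Int × Bool), LBp board start s.1 →
      LBp board start (l.foldl (stepB c) s).1 := by
  intro l
  induction l with
  | nil => intro _ s h; exact h
  | cons v l ih =>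
    intro hl s h
    simp only [List.foldl_cons]
    exact ih (fun v' hv' => hl v' (List.mem_cons_of_mem _ hv')) _
      (stepB_LB board start c v hok (hl v List.mem_cons_self) s h)

lemma sweep_LB (board : List String) (start : Int × Int) (cells : List (Int × Int))
    (hcells : ∀ c ∈ cells, okAb board c = true) :
    ∀ (s : PySem.Dict (Int × Int) Int × Bool), LBp board start s.1 →
      LBp board start (sweepAlt cells s).1 := by
  intro s h
  rw [sweepAlt_eq]
  induction cells generalizing s with
  | nil => exact h
  | cons c cells ih =>
    simp only [List.foldl_cons]
    exact ih (fun c' hc' => hcells c' (List.mem_cons_of_mem _ hc')) _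
      (relaxCell_LB board start c (hcells c List.mem_cons_self) (candL c)
        (fun v hv => hv) s h)

lemma sweep_UB (board : List String) (start : Int × Int) (cells : List (Int × Int))
    (hcells : ∀ c, okAb board c = true → c ∈ cells) (k : Nat)
    (D : PySem.Dict (Int × Int) Int) (hUB : UBp board start k D) :
    UBp board start (k + 1) (sweepAlt cells (D, false)).1 := by
  intro c dn hf hdn
  rcases Nat.lt_or_ge k dn with hgt | hle
  · have hdn' : dn = k + 1 := by omega
    subst hdn'
    rcases (mem_Sl_succ board start k c).mp hf.1 with hmem | ⟨hok, u, hu, hcand⟩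
    · exact absurd hmem (hf.2 k (by omega))
    · obtain ⟨du, hdu, hfu⟩ := fidx_exists board start u hu
      obtain ⟨hcu, hgu⟩ := hUB u du hfu hdu
      have hreach := sweep_reach cells (D, false) c u (k : Int)
        (hcells c hok) ((candL_symm u c).mp hcand) hcu
        (by show D.getD u 0 ≤ (k : Int)
            have : (du : Int) ≤ (k : Int) := by exact_mod_cast hdu
            omega)
      refine ⟨hreach.1, ?_⟩
      have := hreach.2
      push_cast
      omega
  · obtain ⟨hc, hg⟩ := hUB c dn hf hle
    obtain ⟨hc', hg'⟩ := sweep_Mo cells (D, false) c hc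
    have hg'' : (sweepAlt cells (D, false)).1.getD c 0 ≤ D.getD c 0 := hg'
    exact ⟨hc', by omega⟩

def FixB (cells : List (Int × Int)) (D : PySem.Dict (Int × Int) Int) : Prop :=
  ∀ c ∈ cells, ∀ v ∈ candL c, D.contains v = true →
    D.contains c = true ∧ D.getD c 0 ≤ D.getD v 0 + 1

lemma stepB_flag (c : Int × Int) (s : PySem.Dict (Int × Int) Int × Bool) (v : Int × Int)
    (h : s.2 = true) : (stepB c s v).2 = true := by
  unfold stepB
  split_ifs <;> simp [h]

lemma relaxCell_flag (c : Int × Int) :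
    ∀ (l : List (Int × Int)) (s : PySem.Dict (Int × Int) Int × Bool),
      s.2 = true → (l.foldl (stepB c) s).2 = true := by
  intro l
  induction l with
  | nil => intro s h; exact h
  | cons v l ih => intro s h; exact ih _ (stepB_flag c s v h)

lemma relaxCell_unchanged (c : Int × Int) :
    ∀ (l : List (Int × Int)) (s : PySem.Dict (Int × Int) Int × Bool),
      s.2 = false → (l.foldl (stepB c) s).2 = false →
      (l.foldl (stepB c) s) = s ∧
        (∀ v ∈ l, ¬(s.1.contains v = true ∧
          (¬ s.1.contains c = true ∨ s.1.getD v 0 + 1 < s.1.getD c 0))) := by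
  intro l
  induction l with
  | nil => intro s _ _; exact ⟨rfl, by simp⟩
  | cons v l ih =>
    intro s hs hres
    simp only [List.foldl_cons] at hres ⊢
    by_cases hg : (s.1.contains v = true ∧
        (¬ s.1.contains c = true ∨ s.1.getD v 0 + 1 < s.1.getD c 0))
    · exfalso
      have : (stepB c s v).2 = true := by unfold stepB; rw [if_pos hg]
      rw [relaxCell_flag c l _ this] at hres
      cases hres
    · have hstep : stepB c s v = s := by unfold stepB; rw [if_neg hg]
      rw [hstep] at hres ⊢
      obtain ⟨h1, h2⟩ := ih s hs hres
      refine ⟨h1, ?_⟩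
      intro v' hv'
      rcases List.mem_cons.mp hv' with rfl | hv'
      · exact hg
      · exact h2 v' hv'

lemma sweep_unchanged (cells : List (Int × Int)) (D : PySem.Dict (Int × Int) Int)
    (h : (sweepAlt cells (D, false)).2 = false) :
    (sweepAlt cells (D, false)).1 = D ∧ FixB cells D := by
  rw [sweepAlt_eq] at h ⊢
  have main : ∀ (cs : List (Int × Int)),
      ((cs.foldl (fun s c => (candL c).foldl (stepB c) s) (D, false))).2 = false →
      (cs.foldl (fun s c => (candL c).foldl (stepB c) s) (D, false)) = (D, false) ∧
        FixB cs D := by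
    intro cs
    induction cs with
    | nil => intro _; exact ⟨rfl, by intro c hc; cases hc⟩
    | cons c cs ih =>
      intro hres
      simp only [List.foldl_cons] at hres ⊢
      have hflag : ((candL c).foldl (stepB c) (D, false)).2 = false := by
        cases hfl : ((candL c).foldl (stepB c) (D, false)).2
        · rfl
        · exfalso
          have : ∀ (ds : List (Int × Int)) (s : PySem.Dict (Int × Int) Int × Bool),
              s.2 = true →
              ((ds.foldl (fun s c => (candL c).foldl (stepB c) s) s)).2 = true := by
            intro ds
            induction ds with
            | nil => intro s h; exact h
            | cons d ds ih2 => intro s h; exact ih2 _ (relaxCell_flag d (candL d) s h)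
          rw [this cs _ hfl] at hres
          cases hres
      obtain ⟨heq, hguards⟩ := relaxCell_unchanged c (candL c) (D, false) rfl hflag
      rw [heq] at hres ⊢
      obtain ⟨h1, h2⟩ := ih hres
      refine ⟨h1, ?_⟩
      intro c' hc' v hv hcv
      rcases List.mem_cons.mp hc' with rfl | hc'
      · have hng := hguards v hv
        by_cases hcc : D.contains c' = true
        · refine ⟨hcc, ?_⟩
          by_contra hlt
          exact hng ⟨hcv, Or.inr (show D.getD v 0 + 1 < D.getD c' 0 by omega)⟩
        · exact absurd ⟨hcv, Or.inl hcc⟩ hng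
      · exact h2 c' hc' v hv hcv
  obtain ⟨h1, h2⟩ := main cells h
  rw [h1]
  exact ⟨rfl, h2⟩

lemma fix_UB (board : List String) (start : Int × Int) (cells : List (Int × Int))
    (hcells : ∀ c, okAb board c = true → c ∈ cells)
    (D : PySem.Dict (Int × Int) Int) (hfix : FixB cells D)
    (hbase : D.contains start = true ∧ D.getD start 0 ≤ 0) :
    ∀ k, UBp board start k D := by
  intro k
  induction k with
  | zero =>
    intro c dn hf hdn
    have hdn0 : dn = 0 := by omega
    subst hdn0
    have : c ∈ Sl board start 0 := hf.1
    rw [Sl_zero] at this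
    simp only [List.mem_singleton] at this
    subst this
    exact ⟨hbase.1, by simpa using hbase.2⟩
  | succ k ih =>
    intro c dn hf hdn
    rcases Nat.lt_or_ge k dn with hgt | hle
    · have hdn' : dn = k + 1 := by omega
      subst hdn'
      rcases (mem_Sl_succ board start k c).mp hf.1 with hmem | ⟨hok, u, hu, hcand⟩
      · exact absurd hmem (hf.2 k (by omega))
      · obtain ⟨du, hdu, hfu⟩ := fidx_exists board start u hu
        obtain ⟨hcu, hgu⟩ := ih u du hfu hdu
        obtain ⟨hcc, hgc⟩ := hfix c (hcells c hok) u ((candL_symm u c).mp hcand) hcu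
        refine ⟨hcc, ?_⟩
        have : (du : Int) ≤ (k : Int) := by exact_mod_cast hdu
        push_cast
        omega
    · exact ih c dn hf hle

lemma good_val (board : List String) (start : Int × Int) (k : Nat)
    (D : PySem.Dict (Int × Int) Int) (hLB : LBp board start D) (hUB : UBp board start k D)
    (c : Int × Int) (dn : Nat) (hf : fidx board start c dn) (hk : dn ≤ k) :
    D.getD c 0 = (dn : Int) := by
  obtain ⟨hc, hle⟩ := hUB c dn hf hk
  obtain ⟨dn', hval, hmem⟩ := hLB c hc
  have := fidx_le_of_mem board start c hf hmem
  rw [hval]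
  omega

lemma rounds_run (board : List String) (start : Int × Int) (cells : List (Int × Int))
    (hcells : ∀ c, okAb board c = true ↔ c ∈ cells) :
    ∀ (n : Nat) (D : PySem.Dict (Int × Int) Int) (k : Nat),
      (D.contains start = true ∧ D.getD start 0 ≤ 0) →
      LBp board start D → UBp board start k D →
      ∀ c dn, fidx board start c dn → dn ≤ k + n →
        (roundsAlt cells n D).getD c 0 = (dn : Int) := by
  intro n
  induction n with
  | zero =>
    intro D k hbase hLB hUB c dn hf hdn
    exact good_val board start k D hLB hUB c dn hf (by omega)
  | succ n ih =>
    intro D k hbase hLB hUB c dn hf hdn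
    simp only [roundsAlt]
    by_cases hfl : (sweepAlt cells (D, false)).2 = true
    · rw [if_pos hfl]
      have hbase' : (sweepAlt cells (D, false)).1.contains start = true ∧
          (sweepAlt cells (D, false)).1.getD start 0 ≤ 0 := by
        obtain ⟨h1, h2⟩ := sweep_Mo cells (D, false) start hbase.1
        have h2' : (sweepAlt cells (D, false)).1.getD start 0 ≤ D.getD start 0 := h2
        exact ⟨h1, by omega⟩
      exact ih _ (k + 1) hbase'
        (sweep_LB board start cells (fun c hc => (hcells c).mpr hc) (D, false) hLB)
        (sweep_UB board start cells (fun c hc => (hcells c).mp hc) k D hUB)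
        c dn hf (by omega)
    · rw [if_neg hfl]
      have hfl' : (sweepAlt cells (D, false)).2 = false := by
        cases h : (sweepAlt cells (D, false)).2
        · rfl
        · exact absurd h hfl
      obtain ⟨heq, hfix⟩ := sweep_unchanged cells D hfl'
      rw [heq]
      exact good_val board start dn D hLB
        (fix_UB board start cells (fun c hc => (hcells c).mp hc) D hfix hbase dn)
        c dn hf (le_refl _)

lemma cellsAlt_mem (board : List String) (c : Int × Int) :
    c ∈ cellsAlt board (HH board) (WW board) ↔ okAb board c = true := by
  unfold cellsAlt
  have hinner : ∀ (acc : List (Int × Int)) (i : Int),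
      (PySem.List.pyRange 0 (WW board) 1).foldl (fun acc j =>
        if ((PySem.Str.pyGet? ((PySem.List.pyGet? board i).getD "") j).getD '#') ≠ '#'
        then acc ++ [(i, j)] else acc) acc
      = acc ++ ((PySem.List.pyRange 0 (WW board) 1).filter
          (fun j => decide (((PySem.Str.pyGet? ((PySem.List.pyGet? board i).getD "") j).getD '#') ≠ '#'))).map
            (fun j => (i, j)) := by
    intro acc i
    exact PySem.List.foldl_append_ite
      (fun j => ((PySem.Str.pyGet? ((PySem.List.pyGet? board i).getD "") j).getD '#') ≠ '#')
      (fun j => (i, j)) _ _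
  simp only [hinner]
  rw [PySem.List.foldl_append_eq_flatMap]
  simp only [List.nil_append, List.mem_flatMap, List.mem_map, List.mem_filter,
    PySem.List.mem_pyRange_one, decide_eq_true_eq]
  constructor
  · rintro ⟨i, ⟨hi0, hih⟩, j, ⟨⟨hj0, hjw⟩, hch⟩, rfl⟩
    simp only [okAb, decide_eq_true_eq]
    exact ⟨⟨hi0, hih⟩, ⟨hj0, hjw⟩, hch⟩
  · intro hok
    simp only [okAb, decide_eq_true_eq] at hok
    exact ⟨c.1, ⟨hok.1.1, hok.1.2⟩, c.2, ⟨⟨hok.2.1.1, hok.2.1.2⟩, hok.2.2⟩, rfl⟩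

lemma B_final (board : List String) (start c : Int × Int) (dn : Nat)
    (h : fidx board start c dn) (hdn : dn ≤ ((HH board) * (WW board)).toNat) :
    (roundsAlt (cellsAlt board (HH board) (WW board)) ((HH board) * (WW board)).toNat
      (PySem.Dict.ofList [(start, 0)])).getD c 0 = (dn : Int) := by
  have hof : PySem.Dict.ofList [((start : Int × Int), (0 : Int))]
      = PySem.Dict.empty.insert start 0 := rfl
  have hbase : (PySem.Dict.ofList [((start : Int × Int), (0 : Int))]).contains start = true ∧
      (PySem.Dict.ofList [((start : Int × Int), (0 : Int))]).getD start 0 ≤ 0 := by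
    rw [hof]
    exact ⟨PySem.Dict.contains_insert_self _ _ _, by rw [PySem.Dict.getD_insert_self]⟩
  have hLB : LBp board start (PySem.Dict.ofList [((start : Int × Int), (0 : Int))]) := by
    intro x hx
    rw [hof, PySem.Dict.contains_insert] at hx
    have hxs : x = start := by
      rcases Bool.or_eq_true_iff.mp hx with h' | h'
      · simpa using h'
      · rw [PySem.Dict.contains_empty] at h'; cases h'
    refine ⟨0, ?_, ?_⟩
    · rw [hxs, hof, PySem.Dict.getD_insert_self]; rfl
    · rw [hxs, Sl_zero]; exact List.mem_singleton_self _
  have hUB : UBp board start 0 (PySem.Dict.ofList [((start : Int × Int), (0 : Int))]) := by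
    intro c' dn' hf' hdn'
    have h0 : dn' = 0 := by omega
    subst h0
    have hc' : c' ∈ Sl board start 0 := hf'.1
    rw [Sl_zero] at hc'
    simp only [List.mem_singleton] at hc'
    rw [hc']
    exact ⟨hbase.1, by simpa using hbase.2⟩
  exact rounds_run board start (cellsAlt board (HH board) (WW board))
    (fun c' => (cellsAlt_mem board c').symm) ((HH board * WW board).toNat)
    (PySem.Dict.ofList [(start, 0)]) 0 hbase hLB hUB c dn h (by omega)

-- ---- glue: the extracted dictionaries agree under Pre_ ----
lemma head_getD_eq (board : List String) :
    (PySem.List.pyGet? board 0).getD "" = board.headD "" := by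
  cases board <;> simp [PySem.List.pyGet?, PySem.List.pyIdx?]

lemma hw_toNat (board : List String) :
    ((HH board) * (WW board)).toNat = board.length * wN board := by
  have : WW board = (wN board : Int) := by simp [WW, wN, PySem.Str.len_eq]
  rw [this]
  simp only [HH]
  rw [← Nat.cast_mul, Int.toNat_natCast]

lemma reachPre_eq_Sl (board : List String) (c : Int × Int) :
    reachPre board c = Sl board c (board.length * wN board) := by
  rw [reachPre, Sl]
  congr 1
  rw [wN, head_getD_eq]

lemma key_item (numbers : List (Int × Int × Int)) (num : Int)
    (hnum : num ∈ (PySem.Dict.ofList numbers).keys) :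
    (num, (PySem.Dict.ofList numbers).getD num ((0 : Int), (0 : Int)))
      ∈ (PySem.Dict.ofList numbers).items := by
  simp only [PySem.Dict.keys] at hnum
  obtain ⟨p, hp, hp1⟩ := List.mem_map.mp hnum
  obtain ⟨k0, v0⟩ := p
  simp only at hp1
  subst hp1
  rw [PySem.Dict.getD_of_mem_items _ hp (PySem.Dict.nodup_keys_ofList numbers)]
  exact hp

lemma val_eq (board : List String) (start ij : Int × Int)
    (hreach : ij ∈ reachPre board start) :
    ((bfsA start board).get? (ij.1, ij.2)).getD 0
      = ((roundsAlt (cellsAlt board ((board.length : Int))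
            (PySem.Str.len ((PySem.List.pyGet? board 0).getD "")))
          (((board.length : Int) * PySem.Str.len ((PySem.List.pyGet? board 0).getD "")).toNat)
          (PySem.Dict.ofList [(start, 0)])).get? (ij.1, ij.2)).getD 0 := by
  rw [reachPre_eq_Sl] at hreach
  obtain ⟨dnn, hdn, hf⟩ := fidx_exists board start ij hreach
  rw [← PySem.Dict.getD_eq_get?_getD, ← PySem.Dict.getD_eq_get?_getD]
  have heta : ((ij.1, ij.2) : Int × Int) = ij := rfl
  rw [heta]
  rw [A_final board start ij dnn hf]
  have hB := B_final board start ij dnn hf (by rw [hw_toNat]; exact hdn)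
  exact hB.symm

theorem ports_eq (numbers : List (Int × Int × Int)) (board : List String)
    (hpre : Pre_pairwise_distances_py numbers board) :
    pairwise_distances_py numbers board = pairwise_distances_py_alt numbers board := by
  rcases hpre with hnil | ⟨hbne, hrows, hreach⟩
  · subst hnil; rfl
  · simp only [pairwise_distances_py, pairwise_distances_py_alt]
    refine congrArg PySem.Dict.items (PySem.List.foldl_congr_mem _ _ _ _ ?_)
    intro pairs num hnum
    have hmem1 := key_item numbers num hnum
    congr 1
    simp only [extractA]
    refine congrArg PySem.Dict.items (PySem.List.foldl_congr_mem _ _ _ _ ?_)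
    intro e n hn
    have hmem2 := key_item numbers n hn
    congr 1
    exact val_eq board _ _ (hreach _ hmem1 _ hmem2)

-- ===== VERDICT (by name: the statement is the Claim_ definition above) =====
theorem pairwise_distances_py_spec : Claim_equal_pairwise_distances_py := by
  intro numbers board _ hpre
  exact ports_eq numbers board hpre
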